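-- pv_equiv track=rewrite | github.com/agh-bit-academy/SummerProject2022 | WDI/Zestaw_3/Zadanie_11/sol.py | f
-- ===== SOURCE A (Python) =====
-- def f(T):
--     count = 2
--     save = 0
--     for i in range(1, len(T) - 2):
--         if T[i] ** 2 == T[i + 1] * T[i - 1]:
--             count += 1
--         elif T[i] ** 2 != T[i + 1] * T[i - 1]:
--             if count > save:
--                 save = count
--                 count = 2
--             else:
--                 count = 2
--     if save >= count:
--         return save
--     else:
--         return count
-- ===== SOURCE B (Python) =====
-- def f(T):
--     flags = [T[i] * T[i] == T[i + 1] * T[i - 1] for i in range(1, len(T) - 2)]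
--     cuts = [-1] + [j for j, ok in enumerate(flags) if not ok] + [len(flags)]
--     return 2 + max(b - a - 1 for a, b in zip(cuts, cuts[1:]))
-- ===== Notes on version B (the rewrite author's own statement) =====
-- stated objective: alternative
-- what changed: Replaces A's interleaved count/save accumulator loop with a build-the-flag-table, cut-at-false-positions, longest-gap-between-cuts decomposition (result = 2 + max gap).
import Mathlib
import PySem

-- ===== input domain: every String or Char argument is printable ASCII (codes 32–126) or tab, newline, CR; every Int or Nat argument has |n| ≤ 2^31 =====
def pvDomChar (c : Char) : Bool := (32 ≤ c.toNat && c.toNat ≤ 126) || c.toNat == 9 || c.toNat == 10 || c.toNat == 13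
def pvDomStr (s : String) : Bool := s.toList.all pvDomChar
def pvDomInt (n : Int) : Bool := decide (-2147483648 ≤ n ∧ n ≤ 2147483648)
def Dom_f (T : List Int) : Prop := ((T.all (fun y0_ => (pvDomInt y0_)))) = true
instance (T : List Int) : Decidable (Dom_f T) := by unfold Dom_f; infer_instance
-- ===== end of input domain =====

-- B replaces A's interleaved count/save accumulator loop by a build-flag-table,
-- cut-at-false, longest-gap decomposition (objective: alternative decomposition).

-- ===== PORT A =====
-- T[i] etc. are ported with pyGetD 0: every index produced by range(1, len(T)-2)
-- is in bounds (1 ≤ i ≤ len-3), so the default is never used and the port is exact.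
def f (T : List Int) : Int :=
  let r := (PySem.List.pyRange 1 ((T.length : Int) - 2) 1).foldl
    (fun (cs : Int × Int) i =>
      if PySem.List.pyGetD T i 0 ^ 2 == PySem.List.pyGetD T (i + 1) 0 * PySem.List.pyGetD T (i - 1) 0 then
        (cs.1 + 1, cs.2)
      else if PySem.List.pyGetD T i 0 ^ 2 != PySem.List.pyGetD T (i + 1) 0 * PySem.List.pyGetD T (i - 1) 0 then
        (if cs.1 > cs.2 then (2, cs.1) else (2, cs.2))
      else cs) (2, 0)
  if r.2 ≥ r.1 then r.2 else r.1

-- ===== PORT B =====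
-- max(gen) in Source B is ported as (max? …).getD 0; the gaps list is never empty
-- (cuts always has ≥ 2 elements), so Python's max never raises and getD is never used.
def f_alt (T : List Int) : Int :=
  let flags := (PySem.List.pyRange 1 ((T.length : Int) - 2) 1).map
    (fun i => PySem.List.pyGetD T i 0 * PySem.List.pyGetD T i 0 ==
              PySem.List.pyGetD T (i + 1) 0 * PySem.List.pyGetD T (i - 1) 0)
  let cuts : List Int :=
    [-1] ++ ((PySem.List.enumerate flags 0).filter (fun p => !p.2)).map (fun p => p.1)
         ++ [(flags.length : Int)]
  let gaps := (cuts.zip (PySem.List.slice cuts (some 1) none)).map (fun q => q.2 - q.1 - 1)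
  2 + (PySem.List.max? gaps (fun y => y)).getD 0

-- ===== PRECONDITION & SPEC =====
def Spec_f (T : List Int) (out : Int) : Prop := out = f_alt T
instance (T : List Int) (out : Int) : Decidable (Spec_f T out) := by unfold Spec_f; infer_instance

-- ===== CLAIM (what is proved, stated in full; the proofs are below) =====
def Claim_equal_f : Prop := ∀ (T : List Int), Dom_f T → Spec_f T (f T)

-- ===== LEMMAS AND PROOFS =====

-- common reference loop: longest run of `true`s, tracked as (current run, best run)
def stepB (cb : Int × Int) (b : Bool) : Int × Int :=
  (if b then cb.1 + 1 else 0, max cb.2 (if b then cb.1 + 1 else 0))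

-- A's loop body as a function of the boolean flag
def stepA (cs : Int × Int) (b : Bool) : Int × Int :=
  if b then (cs.1 + 1, cs.2)
  else if !b then (if cs.1 > cs.2 then (2, cs.1) else (2, cs.2))
  else cs

-- B's longest-gap recursion: previous cut at p, scanning from index j
def M (p j : Int) : List Bool → Int
  | [] => j - p - 1
  | b :: l => if b then M p (j + 1) l else max (j - p - 1) (M j (j + 1) l)

-- gap list of a cut list p :: r
def gapList (p : Int) : List Int → List Int
  | [] => []
  | x :: r => (x - p - 1) :: gapList x r

-- max over gaps of cuts p :: c ++ [e]
def mgap (p : Int) (c : List Int) (e : Int) : Int :=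
  match c with
  | [] => e - p - 1
  | x :: c => max (x - p - 1) (mgap x c e)

-- false positions of l, indices starting at j (what B's comprehension computes)
def fIdx (j : Int) (l : List Bool) : List Int :=
  ((PySem.List.enumerate l j).filter (fun p => !p.2)).map (fun p => p.1)

theorem fIdx_nil (j : Int) : fIdx j [] = [] := by
  simp [fIdx, PySem.List.enumerate_nil]

theorem fIdx_cons (j : Int) (b : Bool) (l : List Bool) :
    fIdx j (b :: l) = (if b then [] else [j]) ++ fIdx (j + 1) l := by
  cases b <;> simp [fIdx, PySem.List.enumerate_cons]

-- A's loop computes 2 + longest run (invariant form)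
theorem lemA (l : List Bool) :
    ∀ (c s cur best : Int), c = 2 + cur → 0 ≤ cur → cur ≤ best →
      (if s ≥ c then s else c) = 2 + best →
      (if (l.foldl stepA (c, s)).2 ≥ (l.foldl stepA (c, s)).1
        then (l.foldl stepA (c, s)).2 else (l.foldl stepA (c, s)).1)
        = 2 + (l.foldl stepB (cur, best)).2 := by
  induction l with
  | nil =>
    intro c s cur best hc _ _ hs
    simpa using hs
  | cons b l ih =>
    intro c s cur best hc hcur hcb hs
    cases b
    · -- flag false: A resets count and folds it into save; B resets run to 0
      simp only [List.foldl_cons, stepA, stepB, Bool.not_false, if_false, if_true,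
        Bool.false_eq_true]
      have hbest : max best (0 : Int) = best := by omega
      rw [hbest]
      by_cases hgt : c > s
      · rw [if_pos hgt]
        apply ih _ _ _ _ (by omega) (by omega) (by omega)
        split_ifs at hs ⊢ with h1 h2 <;> omega
      · rw [if_neg hgt]
        apply ih _ _ _ _ (by omega) (by omega) (by omega)
        split_ifs at hs ⊢ with h1 h2 <;> omega
    · -- flag true: both extend the current run
      simp only [List.foldl_cons, stepA, stepB, if_true]
      apply ih _ _ _ _ (by omega) (by omega) (le_max_right _ _)
      split_ifs at hs ⊢ with h1 h2 <;> omega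

-- best is only ever max-ed into: pull a max out of the initial best
theorem lemM1 (l : List Bool) :
    ∀ (c b1 b2 : Int),
      (l.foldl stepB (c, max b1 b2)).2 = max b1 (l.foldl stepB (c, b2)).2 := by
  induction l with
  | nil => intro c b1 b2; simp
  | cons b l ih =>
    intro c b1 b2
    cases b <;>
      simp only [List.foldl_cons, stepB, ite_true, ite_false, Bool.false_eq_true] <;>
      rw [max_assoc, ih]

-- M agrees with the reference loop
theorem lemM (l : List Bool) :
    ∀ (p j : Int), p < j →
      M p j l = (l.foldl stepB (j - p - 1, j - p - 1)).2 := by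
  induction l with
  | nil => intro p j _; simp [M]
  | cons b l ih =>
    intro p j hpj
    cases b
    · -- false: cut at j
      simp only [M, Bool.false_eq_true, if_false, List.foldl_cons, stepB]
      rw [lemM1, ih j (j + 1) (by omega)]
      norm_num
    · -- true: run continues
      simp only [M, if_true, List.foldl_cons, stepB]
      rw [show max (j - p - 1) (j - p - 1 + 1) = (j + 1) - p - 1 from by omega,
          show (j - p - 1 + 1 : Int) = (j + 1) - p - 1 from by omega]
      exact ih p (j + 1) (by omega)

-- the cut-position recursion computes M
theorem lemCut (l : List Bool) :
    ∀ (p j : Int), mgap p (fIdx j l) (j + l.length) = M p j l := by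
  induction l with
  | nil => intro p j; simp [fIdx_nil, mgap, M]
  | cons b l ih =>
    intro p j
    cases b
    · simp only [fIdx_cons, Bool.false_eq_true, if_false, List.singleton_append,
        List.length_cons, M, mgap]
      have he : (j + ((l.length : Int) + 1) : Int) = (j + 1) + (l.length : Int) := by ring
      push_cast
      rw [he, ih j (j + 1)]
    · simp only [fIdx_cons, if_true, List.nil_append, List.length_cons, M]
      have he : (j + ((l.length : Int) + 1) : Int) = (j + 1) + (l.length : Int) := by ring
      push_cast
      rw [he]
      exact ih p (j + 1)

theorem foldl_max_max (t : List Int) :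
    ∀ (a b : Int), t.foldl max (max a b) = max a (t.foldl max b) := by
  induction t with
  | nil => intro a b; rfl
  | cons x t ih =>
    intro a b
    simp only [List.foldl_cons]
    rw [max_assoc, ih]

-- zip-with-tail of p :: r produces gapList p r
theorem zip_gaps (r : List Int) :
    ∀ (p : Int), ((p :: r).zip r).map (fun q => q.2 - q.1 - 1) = gapList p r := by
  induction r with
  | nil => intro p; simp [gapList]
  | cons x r ih =>
    intro p
    simp only [List.zip_cons_cons, List.map_cons, gapList]
    rw [← ih x]

-- max over the gap list is mgap
theorem max_gaps (c : List Int) :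
    ∀ (p e : Int),
      (PySem.List.max? (gapList p (c ++ [e])) (fun y => y)).getD 0 = mgap p c e := by
  induction c with
  | nil => intro p e; simp [gapList, mgap, PySem.List.max?_id_cons]
  | cons x c ih =>
    intro p e
    simp only [List.cons_append, gapList, mgap]
    rcases hg : gapList x (c ++ [e]) with _ | ⟨h, t⟩
    · exfalso
      cases c <;> simp [gapList] at hg
    · rw [PySem.List.max?_id_cons]
      have := ih x e
      rw [hg, PySem.List.max?_id_cons] at this
      simp only [List.foldl_cons, Option.getD_some] at this ⊢
      rw [foldl_max_max, this]

-- ===== VERDICT (by name: the statement is the Claim_ definition above) =====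
theorem f_spec : Claim_equal_f := by
  intro T _
  show f T = f_alt T
  unfold f f_alt
  simp only []
  set rng := PySem.List.pyRange 1 ((T.length : Int) - 2) 1 with hrng
  set cmp : Int → Bool := fun i =>
    PySem.List.pyGetD T i 0 * PySem.List.pyGetD T i 0 ==
    PySem.List.pyGetD T (i + 1) 0 * PySem.List.pyGetD T (i - 1) 0 with hcmp
  set flags := rng.map cmp with hflags
  -- A's loop body, as a function of the flag at i
  have hfun : (fun (cs : Int × Int) i =>
      if PySem.List.pyGetD T i 0 ^ 2 == PySem.List.pyGetD T (i + 1) 0 * PySem.List.pyGetD T (i - 1) 0 then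
        (cs.1 + 1, cs.2)
      else if PySem.List.pyGetD T i 0 ^ 2 != PySem.List.pyGetD T (i + 1) 0 * PySem.List.pyGetD T (i - 1) 0 then
        (if cs.1 > cs.2 then (2, cs.1) else (2, cs.2))
      else cs) = (fun cs i => stepA cs (cmp i)) := by
    funext cs i
    simp only [stepA, hcmp, pow_two, bne]
  rw [hfun, ← List.foldl_map, ← hflags]
  -- B's pipeline, down to the reference loop
  rw [PySem.List.slice_from_one]
  rw [show ([-1] ++ ((PySem.List.enumerate flags 0).filter (fun p => !p.2)).map (fun p => p.1)
        ++ [(flags.length : Int)])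
      = (-1 : Int) :: (fIdx 0 flags ++ [(flags.length : Int)]) from by simp [fIdx]]
  rw [List.tail_cons, zip_gaps, max_gaps]
  rw [show ((flags.length : Int)) = 0 + (flags.length : Int) from by ring]
  rw [lemCut flags (-1) 0, lemM flags (-1) 0 (by omega)]
  have h := lemA flags 2 0 0 0 (by omega) (by omega) (by omega) (by norm_num)
  norm_num at h ⊢
  exact h
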